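-- pv_equiv track=rewrite | github.com/MikeRock51/Random | parseQueries.py | solution
-- ===== SOURCE A (Python) =====
-- def solution(queries):
--     container = []
--     output = []
--
--     for query in queries:
--         if query[0] == "ADD":
--             container.append(query[1])
--             output.append("")
--         elif query[0] == "EXISTS":
--             if query[1] in container:
--                 output.append("true")
--             else:
--                 output.append("false")
--         elif query[0] == "REMOVE":
--             if query[1] in container:
--                 container.remove(query[1])
--                 output.append("true")
--             else:
--                 output.append("false")
--         elif query[0] == "GET_NEXT":
--             nextVal = None
--             for value in sorted(container, key=lambda x: int(x)):
--                 if int(value) > int(query[1]):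
--                     nextVal = value
--                     break
--             if not nextVal:
--                 output.append("")
--             else:
--                 output.append(str(nextVal))
--
--     return output
-- ===== SOURCE B (Python) =====
-- def step(container, query):
--     op = query[0]
--     if op == "ADD":
--         return container + [query[1]], ""
--     if op == "EXISTS":
--         return container, ("true" if container.count(query[1]) > 0 else "false")
--     if op == "REMOVE":
--         if container.count(query[1]) == 0:
--             return container, "false"
--         i = container.index(query[1])
--         return container[:i] + container[i + 1:], "true"
--     if op == "GET_NEXT":
--         if not container:
--             return container, ""
--         keys = [int(v) for v in container]
--         t = int(query[1])
--         best, bi = None, None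
--         for v, k in zip(container, keys):
--             if k > t and (bi is None or k < bi):
--                 best, bi = v, k
--         return container, (best if best is not None else "")
--     return container, None
--
--
-- def solution(queries):
--     container = []
--     output = []
--     for query in queries:
--         container, res = step(container, query)
--         if res is not None:
--             output.append(res)
--     return output
-- ===== Notes on version B (the rewrite author's own statement) =====
-- stated objective: alternative
-- what changed: B is decomposed into a pure per-query step helper returning (new container, optional answer); GET_NEXT replaces A's sort-then-break (sorted by int key, first element above the target) with a single unsorted min-scan over precomputed keys, and REMOVE replaces A's membership-test-plus-remove by count/index and slice concatenation; not measurably faster on the benchmark inputs.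
-- outside the precondition, e.g. on solution([['GET_NEXT']]): A returns [''], B returns ['']
import Mathlib
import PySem

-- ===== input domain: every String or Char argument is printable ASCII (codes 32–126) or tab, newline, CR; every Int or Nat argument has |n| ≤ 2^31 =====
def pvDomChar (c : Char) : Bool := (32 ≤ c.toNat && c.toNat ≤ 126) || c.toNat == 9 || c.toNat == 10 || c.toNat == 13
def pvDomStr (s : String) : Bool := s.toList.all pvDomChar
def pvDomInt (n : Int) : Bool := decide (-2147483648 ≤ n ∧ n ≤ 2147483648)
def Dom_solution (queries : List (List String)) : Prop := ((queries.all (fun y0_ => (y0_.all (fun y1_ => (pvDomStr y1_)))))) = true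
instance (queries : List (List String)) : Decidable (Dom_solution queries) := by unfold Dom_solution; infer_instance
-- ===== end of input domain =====

-- B restructures A into a pure per-query step helper (new container, optional answer):
-- GET_NEXT replaces A's sort-then-break by one unsorted min-scan over precomputed int
-- keys, and REMOVE replaces membership-test-plus-remove by count/index and slices.

-- ===== PORT A =====

-- int(s), used on strings Pre_solution guarantees to be valid int literals (ValueError excluded)
def pvIntKey (s : String) : Int := (PySem.Int.ofStr? s).getD 0

def pvStepA (st : List String × List String) (query : List String) : List String × List String :=
  match PySem.List.pyGet? query 0 with
  | none => st  -- query[0]: IndexError on an empty query; excluded by Pre_solution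
  | some op =>
    if op = "ADD" then
      match PySem.List.pyGet? query 1 with
      | none => st  -- query[1]: IndexError; excluded by Pre_solution
      | some v => (st.1 ++ [v], st.2 ++ [""])
    else if op = "EXISTS" then
      match PySem.List.pyGet? query 1 with
      | none => st
      | some v => if v ∈ st.1 then (st.1, st.2 ++ ["true"]) else (st.1, st.2 ++ ["false"])
    else if op = "REMOVE" then
      match PySem.List.pyGet? query 1 with
      | none => st
      | some v =>
        if v ∈ st.1 then ((PySem.List.remove? st.1 v).getD st.1, st.2 ++ ["true"])
        else (st.1, st.2 ++ ["false"])
    else if op = "GET_NEXT" then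
      -- for value in sorted(container, key=int): if int(value) > int(query[1]): nextVal = value; break
      let nextVal : Option String :=
        match PySem.List.pyGet? query 1 with
        | none => none  -- int(query[1]) IndexError, reachable only with a nonempty container; excluded by Pre_solution
        | some v =>
          List.find? (fun x => decide (pvIntKey x > pvIntKey v))
            (PySem.List.sorted st.1 pvIntKey false)
      match nextVal with
      | none => (st.1, st.2 ++ [""])
      | some w => if w = "" then (st.1, st.2 ++ [""]) else (st.1, st.2 ++ [w])  -- `if not nextVal` is also true for ""
    else st

def solution (queries : List (List String)) : List String :=
  (queries.foldl pvStepA ([], [])).2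

-- ===== PORT B =====

-- step(container, query) -> (new container, res); res = none means "no output" (unknown op)
def pvStepB (c : List String) (query : List String) : List String × Option String :=
  match PySem.List.pyGet? query 0 with
  | none => (c, none)  -- query[0]: IndexError on an empty query; excluded by Pre_solution
  | some op =>
    if op = "ADD" then
      match PySem.List.pyGet? query 1 with
      | none => (c, none)  -- query[1]: IndexError; excluded by Pre_solution
      | some v => (c ++ [v], some "")
    else if op = "EXISTS" then
      match PySem.List.pyGet? query 1 with
      | none => (c, none)
      | some v => (c, some (if PySem.List.count c v > 0 then "true" else "false"))
    else if op = "REMOVE" then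
      match PySem.List.pyGet? query 1 with
      | none => (c, none)
      | some v =>
        if PySem.List.count c v = 0 then (c, some "false")
        else
          let i : Nat := (PySem.List.index? c v).getD 0  -- count > 0 guarantees the index exists
          (PySem.List.slice c none (some (i : Int)) ++ PySem.List.slice c (some ((i : Int) + 1)) none,
            some "true")
    else if op = "GET_NEXT" then
      if c = [] then (c, some "")
      else
        -- keys = [int(v) for v in container]; t = int(query[1]); min-scan over zip(container, keys)
        let keys := c.map pvIntKey
        match PySem.List.pyGet? query 1 with
        | none => (c, none)  -- int(query[1]) IndexError; excluded by Pre_solution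
        | some a =>
          let t := pvIntKey a
          let best : Option (String × Int) :=
            (c.zip keys).foldl (fun acc vk =>
              match acc with
              | none => if vk.2 > t then some vk else none
              | some (_, bi) => if vk.2 > t ∧ vk.2 < bi then some vk else acc) none
          match best with
          | none => (c, some "")
          | some (b, _) => (c, some b)
    else (c, none)

def pvRunB (st : List String × List String) (query : List String) : List String × List String :=
  let r := pvStepB st.1 query
  match r.2 with
  | none => (r.1, st.2)
  | some res => (r.1, st.2 ++ [res])

def solution_alt (queries : List (List String)) : List String :=
  (queries.foldl pvRunB ([], [])).2

-- ===== PRECONDITION & SPEC =====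
-- Pre_solution: every query is nonempty and recognised operations carry an argument
-- (otherwise query[0]/query[1] raises IndexError); if any GET_NEXT occurs, every ADD
-- argument is a valid int literal, and if any ADD occurs, every GET_NEXT argument is a
-- valid int literal (otherwise an executed GET_NEXT over a nonempty container raises
-- ValueError in sorted(..., key=int) or at int(query[1])).  This over-approximates the
-- raising runs: it also excludes runs where the offending query never meets a nonempty
-- container (e.g. a non-int ADD removed before any GET_NEXT, or GET_NEXT with a missing
-- or non-int argument while the container is empty); on all such runs A and B return
-- the SAME value, so nothing behavioural is hidden.
def Pre_solution (queries : List (List String)) : Prop :=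
  (∀ q ∈ queries,
    q ≠ [] ∧
    ((q.head? = some "ADD" ∨ q.head? = some "EXISTS" ∨ q.head? = some "REMOVE" ∨
        q.head? = some "GET_NEXT") → 2 ≤ q.length)) ∧
  ((∃ q ∈ queries, q.head? = some "GET_NEXT") →
    ∀ q ∈ queries, q.head? = some "ADD" →
      (q[1]?.map (fun a => (PySem.Int.ofStr? a).isSome)).getD true = true) ∧
  ((∃ q ∈ queries, q.head? = some "ADD") →
    ∀ q ∈ queries, q.head? = some "GET_NEXT" →
      (q[1]?.map (fun a => (PySem.Int.ofStr? a).isSome)).getD true = true)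
instance (queries : List (List String)) : Decidable (Pre_solution queries) := by
  unfold Pre_solution; infer_instance

def pvWitness_solution : List (List String) :=
  [["ADD", "3"], ["ADD", "+5"], ["EXISTS", "x"], ["GET_NEXT", "2"], ["REMOVE", "3"], ["GET_NEXT", "4"]]

def Spec_solution (queries : List (List String)) (out : List String) : Prop := out = solution_alt queries
instance (queries : List (List String)) (out : List String) : Decidable (Spec_solution queries out) := by unfold Spec_solution; infer_instance

-- ===== CLAIM (what is proved, stated in full; the proofs are below) =====
def Claim_equal_solution : Prop := ∀ (queries : List (List String)), Dom_solution queries → Pre_solution queries → Spec_solution queries (solution queries)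

-- ===== LEMMAS AND PROOFS =====

-- all container contents parse as ints (maintained along the fold under Pre_solution)
def pvInvC (c : List String) : Prop := ∀ v ∈ c, (PySem.Int.ofStr? v).isSome = true

-- the body of B's min-scan, rephrased as a fold directly over the container
def pvBStep (t : Int) (acc : Option (String × Int)) (x : String) : Option (String × Int) :=
  match acc with
  | none => if pvIntKey x > t then some (x, pvIntKey x) else none
  | some (_, bi) => if pvIntKey x > t ∧ pvIntKey x < bi then some (x, pvIntKey x) else acc

theorem pv_zip_fold (t : Int) (c : List String) (acc : Option (String × Int)) :
    (c.zip (c.map pvIntKey)).foldl (fun acc vk =>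
        match acc with
        | none => if vk.2 > t then some vk else none
        | some (_, bi) => if vk.2 > t ∧ vk.2 < bi then some vk else acc) acc
      = c.foldl (pvBStep t) acc := by
  induction c generalizing acc with
  | nil => rfl
  | cons x xs ih =>
    simp only [List.map_cons, List.zip_cons_cons, List.foldl_cons, ih]
    rfl

theorem pv_find_insertBy_of_not_gt (t : Int) (x : String) (S : List String)
    (hx : ¬ pvIntKey x > t) :
    List.find? (fun y => decide (pvIntKey y > t))
      (PySem.List.insertBy (fun a b => decide (pvIntKey a < pvIntKey b)) x S)
      = List.find? (fun y => decide (pvIntKey y > t)) S := by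
  induction S with
  | nil => simp [PySem.List.insertBy, List.find?, hx]
  | cons y ys ih =>
    by_cases h : pvIntKey x < pvIntKey y
    · simp [PySem.List.insertBy, h, List.find?, hx]
    · have hins : PySem.List.insertBy (fun a b => decide (pvIntKey a < pvIntKey b)) x (y :: ys)
          = y :: PySem.List.insertBy (fun a b => decide (pvIntKey a < pvIntKey b)) x ys := by
        simp [PySem.List.insertBy, h]
      rw [hins]
      by_cases hy : pvIntKey y > t
      · simp [List.find?, hy]
      · simp [List.find?, hy, ih]

theorem pv_find_insertBy_of_gt (t : Int) (x : String) (S : List String)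
    (hx : pvIntKey x > t) (hs : S.Pairwise (fun a b => pvIntKey a ≤ pvIntKey b)) :
    List.find? (fun y => decide (pvIntKey y > t))
      (PySem.List.insertBy (fun a b => decide (pvIntKey a < pvIntKey b)) x S)
      = (match List.find? (fun y => decide (pvIntKey y > t)) S with
         | none => some x
         | some b => if pvIntKey x < pvIntKey b then some x else some b) := by
  induction S with
  | nil => simp [PySem.List.insertBy, List.find?, hx]
  | cons y ys ih =>
    rcases List.pairwise_cons.mp hs with ⟨hy_le, hys⟩
    by_cases h : pvIntKey x < pvIntKey y
    · by_cases hy : pvIntKey y > t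
      · simp [PySem.List.insertBy, h, List.find?, hx, hy]
      · exact absurd (lt_trans hx h) hy
    · have hins : PySem.List.insertBy (fun a b => decide (pvIntKey a < pvIntKey b)) x (y :: ys)
          = y :: PySem.List.insertBy (fun a b => decide (pvIntKey a < pvIntKey b)) x ys := by
        simp [PySem.List.insertBy, h]
      rw [hins]
      by_cases hy : pvIntKey y > t
      · simp [List.find?, hy, not_lt.mp h]
      · simp [List.find?, hy, ih hys]

theorem pv_scan_eq (t : Int) (c : List String) :
    c.foldl (pvBStep t) none
      = (List.find? (fun y => decide (pvIntKey y > t))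
          (PySem.List.sorted c pvIntKey false)).map (fun w => (w, pvIntKey w)) := by
  induction c using List.reverseRecOn with
  | nil => simp [PySem.List.sorted]
  | append_singleton c x ih =>
    have hsorted : PySem.List.sorted (c ++ [x]) pvIntKey false
        = PySem.List.insertBy (fun a b => decide (pvIntKey a < pvIntKey b)) x
            (PySem.List.sorted c pvIntKey false) := by
      rw [PySem.List.sorted_eq_foldl_insertBy, PySem.List.sorted_eq_foldl_insertBy,
        List.foldl_append]
      rfl
    rw [List.foldl_append, List.foldl_cons, List.foldl_nil, ih, hsorted]
    by_cases hx : pvIntKey x > t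
    · rw [pv_find_insertBy_of_gt t x _ hx (PySem.List.sorted_pairwise c pvIntKey)]
      cases hfind : List.find? (fun y => decide (pvIntKey y > t))
          (PySem.List.sorted c pvIntKey false) with
      | none => simp [pvBStep, hx]
      | some b =>
        by_cases hlt : pvIntKey x < pvIntKey b
        · simp [pvBStep, hx, hlt]
        · simp [pvBStep, hx, hlt]
    · rw [pv_find_insertBy_of_not_gt t x _ hx]
      cases hfind : List.find? (fun y => decide (pvIntKey y > t))
          (PySem.List.sorted c pvIntKey false) with
      | none => simp [pvBStep, hx]
      | some b => simp [pvBStep, hx]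

theorem pv_intlike_ne_empty (v : String) (h : (PySem.Int.ofStr? v).isSome = true) : v ≠ "" := by
  intro hv; subst hv; exact absurd h (by decide)

theorem pv_pyGet0 (op : String) (rest : List String) :
    PySem.List.pyGet? (op :: rest) (0 : Int) = some op := by
  simp [PySem.List.pyGet?, PySem.List.pyIdx?]

theorem pv_pyGet1 (op a : String) (rest : List String) :
    PySem.List.pyGet? (op :: a :: rest) (1 : Int) = some a := by
  simp [PySem.List.pyGet?, PySem.List.pyIdx?]

-- container[:i] + container[i+1:] with i = container.index(v) is exactly container.remove(v)
theorem pv_take_drop_erase (c : List String) (v : String) (i : Nat)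
    (h : PySem.List.index? c v = some i) :
    c.take i ++ c.drop (i + 1) = c.erase v := by
  induction c generalizing i with
  | nil => simp [PySem.List.index?] at h
  | cons x xs ih =>
    by_cases hx : x = v
    · subst hx
      rw [PySem.List.index?_cons_self] at h
      obtain rfl : i = 0 := by simpa using h.symm
      simp
    · rw [PySem.List.index?_cons_of_ne _ hx] at h
      cases hj : PySem.List.index? xs v with
      | none => rw [hj] at h; simp at h
      | some j =>
        rw [hj] at h
        obtain rfl : i = j + 1 := by simpa using h.symm
        have hxv : (x == v) = false := by simpa using hx
        simp [hxv, ← ih j hj]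

theorem pv_step_eq (st : List String × List String) (q : List String)
    (hq : q ≠ [] ∧
      ((q.head? = some "ADD" ∨ q.head? = some "EXISTS" ∨ q.head? = some "REMOVE" ∨
          q.head? = some "GET_NEXT") → 2 ≤ q.length) ∧
      (q.head? = some "ADD" →
        (q[1]?.map (fun a => (PySem.Int.ofStr? a).isSome)).getD true = true))
    (hc : pvInvC st.1) :
    pvStepA st q = pvRunB st q ∧ pvInvC (pvStepA st q).1 := by
  obtain ⟨hne, hlen, hint⟩ := hq
  rcases q with _ | ⟨op, rest⟩
  · exact absurd rfl hne
  by_cases hA : op = "ADD"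
  · subst hA
    rcases rest with _ | ⟨a, rest'⟩
    · simp at hlen
    have ha : (PySem.Int.ofStr? a).isSome = true := by simpa using hint rfl
    refine ⟨?_, ?_⟩
    · simp [pvStepA, pvRunB, pvStepB]
    · simp only [pvStepA, pv_pyGet0, pv_pyGet1]
      intro v hv
      simp at hv
      rcases hv with hv | hv
      · exact hc v hv
      · subst hv; exact ha
  by_cases hE : op = "EXISTS"
  · subst hE
    rcases rest with _ | ⟨a, rest'⟩
    · simp at hlen
    by_cases hv : a ∈ st.1
    · refine ⟨?_, by simpa [pvStepA, pv_pyGet0, pv_pyGet1, hv] using hc⟩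
      simp [pvStepA, pvRunB, pvStepB, hv]
    · refine ⟨?_, by simpa [pvStepA, pv_pyGet0, pv_pyGet1, hv] using hc⟩
      simp [pvStepA, pvRunB, pvStepB, hv]
  by_cases hR : op = "REMOVE"
  · subst hR
    rcases rest with _ | ⟨a, rest'⟩
    · simp at hlen
    by_cases hv : a ∈ st.1
    · have hrem := PySem.List.remove?_eq_some_erase st.1 a hv
      have hcnt : ¬ PySem.List.count st.1 a = 0 := by
        rw [PySem.List.count_eq]
        simpa [List.count_eq_zero] using hv
      obtain ⟨i, hi⟩ := Option.isSome_iff_exists.mp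
        ((PySem.List.index?_isSome_iff st.1 a).mpr hv)
      have hB : pvStepB st.1 ("REMOVE" :: a :: rest') = (st.1.erase a, some "true") := by
        simp only [pvStepB, pv_pyGet0, pv_pyGet1, String.reduceEq, reduceIte, if_neg hcnt,
          hi, Option.getD_some, PySem.List.slice_to_natCast]
        have hcast : ((i : Int) + 1) = ((i + 1 : Nat) : Int) := by push_cast; ring
        rw [hcast, PySem.List.slice_from_natCast, pv_take_drop_erase st.1 a i hi]
      refine ⟨?_, ?_⟩
      · simp [pvStepA, pvRunB, hB, hv, hrem]
      · simp only [pvStepA, pv_pyGet0, pv_pyGet1]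
        simp [hv, hrem]
        intro v hvmem
        exact hc v (List.mem_of_mem_erase hvmem)
    · have hcnt : List.count a st.1 = 0 := by
        simpa [List.count_eq_zero] using hv
      refine ⟨?_, by simpa [pvStepA, pv_pyGet0, pv_pyGet1, hv] using hc⟩
      simp [pvStepA, pvRunB, pvStepB, hv, hcnt]
  by_cases hG : op = "GET_NEXT"
  · subst hG
    rcases rest with _ | ⟨a, rest'⟩
    · simp at hlen
    have hinv : pvInvC (pvStepA st (["GET_NEXT", a] ++ rest')).1 := by
      cases hfind : List.find? (fun y => decide (pvIntKey y > pvIntKey a))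
          (PySem.List.sorted st.1 pvIntKey false) with
      | none => simpa [pvStepA, pv_pyGet0, pv_pyGet1, hfind] using hc
      | some w =>
        by_cases hw : w = "" <;>
          simpa [pvStepA, pv_pyGet0, pv_pyGet1, hfind, hw] using hc
    refine ⟨?_, hinv⟩
    by_cases hcnil : st.1 = []
    · simp [pvStepA, pvRunB, pvStepB, hcnil, PySem.List.sorted]
    · have hscan := pv_scan_eq (pvIntKey a) st.1
      simp only [pvStepA, pvRunB, pvStepB, pv_pyGet0, pv_pyGet1, if_neg hcnil]
      rw [pv_zip_fold, hscan]
      cases hfind : List.find? (fun y => decide (pvIntKey y > pvIntKey a))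
          (PySem.List.sorted st.1 pvIntKey false) with
      | none => simp
      | some w =>
        have hw1 : w ∈ st.1 := by
          have := List.mem_of_find?_eq_some hfind
          rwa [PySem.List.mem_sorted] at this
        have hw : w ≠ "" := pv_intlike_ne_empty w (hc w hw1)
        simp [hw]
  · refine ⟨?_, by simpa [pvStepA, pv_pyGet0, pv_pyGet1, hA, hE, hR, hG] using hc⟩
    simp [pvStepA, pvRunB, pvStepB, hA, hE, hR, hG]

theorem pv_fold_eq (qs : List (List String)) (st : List String × List String)
    (h : ∀ q ∈ qs,
      q ≠ [] ∧
      ((q.head? = some "ADD" ∨ q.head? = some "EXISTS" ∨ q.head? = some "REMOVE" ∨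
          q.head? = some "GET_NEXT") → 2 ≤ q.length) ∧
      (q.head? = some "ADD" →
        (q[1]?.map (fun a => (PySem.Int.ofStr? a).isSome)).getD true = true))
    (hc : pvInvC st.1) :
    qs.foldl pvStepA st = qs.foldl pvRunB st := by
  induction qs generalizing st with
  | nil => rfl
  | cons q qs ih =>
    obtain ⟨heq, hinv⟩ := pv_step_eq st q (h q (List.mem_cons_self)) hc
    rw [List.foldl_cons, List.foldl_cons, ← heq,
      ih (pvStepA st q) (fun r hr => h r (List.mem_cons_of_mem _ hr)) hinv]

-- without any GET_NEXT the int-literal invariant on the container is never consulted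
theorem pv_step_eq_noGN (st : List String × List String) (q : List String)
    (hq : q ≠ [] ∧
      ((q.head? = some "ADD" ∨ q.head? = some "EXISTS" ∨ q.head? = some "REMOVE" ∨
          q.head? = some "GET_NEXT") → 2 ≤ q.length))
    (hg : q.head? ≠ some "GET_NEXT") :
    pvStepA st q = pvRunB st q := by
  obtain ⟨hne, hlen⟩ := hq
  rcases q with _ | ⟨op, rest⟩
  · exact absurd rfl hne
  by_cases hA : op = "ADD"
  · subst hA
    rcases rest with _ | ⟨a, rest'⟩
    · simp at hlen
    simp [pvStepA, pvRunB, pvStepB]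
  by_cases hE : op = "EXISTS"
  · subst hE
    rcases rest with _ | ⟨a, rest'⟩
    · simp at hlen
    by_cases hv : a ∈ st.1 <;> simp [pvStepA, pvRunB, pvStepB, hv]
  by_cases hR : op = "REMOVE"
  · subst hR
    rcases rest with _ | ⟨a, rest'⟩
    · simp at hlen
    by_cases hv : a ∈ st.1
    · have hcnt : ¬ PySem.List.count st.1 a = 0 := by
        rw [PySem.List.count_eq]
        simpa [List.count_eq_zero] using hv
      obtain ⟨i, hi⟩ := Option.isSome_iff_exists.mp
        ((PySem.List.index?_isSome_iff st.1 a).mpr hv)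
      have hB : pvStepB st.1 ("REMOVE" :: a :: rest') = (st.1.erase a, some "true") := by
        simp only [pvStepB, pv_pyGet0, pv_pyGet1, String.reduceEq, reduceIte, if_neg hcnt,
          hi, Option.getD_some, PySem.List.slice_to_natCast]
        have hcast : ((i : Int) + 1) = ((i + 1 : Nat) : Int) := by push_cast; ring
        rw [hcast, PySem.List.slice_from_natCast, pv_take_drop_erase st.1 a i hi]
      simp [pvStepA, pvRunB, hB, hv, PySem.List.remove?_eq_some_erase st.1 a hv]
    · have hcnt : List.count a st.1 = 0 := by
        simpa [List.count_eq_zero] using hv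
      simp [pvStepA, pvRunB, pvStepB, hv, hcnt]
  by_cases hG : op = "GET_NEXT"
  · exact absurd (by simp [hG]) hg
  · simp [pvStepA, pvRunB, pvStepB, hA, hE, hR, hG]

theorem pv_fold_eq_noGN (qs : List (List String)) (st : List String × List String)
    (h : ∀ q ∈ qs,
      q ≠ [] ∧
      ((q.head? = some "ADD" ∨ q.head? = some "EXISTS" ∨ q.head? = some "REMOVE" ∨
          q.head? = some "GET_NEXT") → 2 ≤ q.length))
    (hg : ∀ q ∈ qs, q.head? ≠ some "GET_NEXT") :
    qs.foldl pvStepA st = qs.foldl pvRunB st := by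
  induction qs generalizing st with
  | nil => rfl
  | cons q qs ih =>
    rw [List.foldl_cons, List.foldl_cons,
      ← pv_step_eq_noGN st q (h q List.mem_cons_self) (hg q List.mem_cons_self),
      ih (pvStepA st q) (fun r hr => h r (List.mem_cons_of_mem _ hr))
        (fun r hr => hg r (List.mem_cons_of_mem _ hr))]

-- ===== VERDICT (by name: the statement is the Claim_ definition above) =====
theorem solution_spec : Claim_equal_solution := by
  intro queries _ hpre
  obtain ⟨hshape, hADDargs, _⟩ := hpre
  unfold Spec_solution solution solution_alt
  by_cases hGN : ∃ q ∈ queries, q.head? = some "GET_NEXT"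
  · rw [pv_fold_eq queries ([], [])
      (fun q hq => ⟨(hshape q hq).1, (hshape q hq).2,
        fun hA => hADDargs hGN q hq hA⟩)
      (by intro v hv; simp at hv)]
  · rw [pv_fold_eq_noGN queries ([], []) hshape (by simpa using hGN)]
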